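-- pv_equiv track=rewrite | github.com/krzysztof-turowski/string-algorithms | compression/lempel_ziv.py | naive_factorization
-- ===== SOURCE A (Python) =====
-- def naive_factorization(w, n):
--   LZ = []
--   i = 1
--   while i <= n:
--     matched = [w[i:i + k]
--            for k in range(1, n) if w.index(w[i:(i + k)]) < i]
--     longest = matched[-1] if matched else ''
--     LZ.append((i, len(longest), w[i]))
--     i += max(1, len(longest))
--
--   return LZ
-- ===== SOURCE B (Python) =====
-- def naive_factorization(w, n):
--   LZ = []
--   i = 1
--   while i <= n:
--     best = 0
--     for j in range(i):
--       t = 0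
--       while i + t < len(w) and w[j + t] == w[i + t]:
--         t += 1
--       if t > best:
--         best = t
--     length = min(best, n - 1)
--     LZ.append((i, length, w[i]))
--     i += max(1, length)
--   return LZ
-- ===== Notes on version B (the rewrite author's own statement) =====
-- stated objective: faster
-- what changed: A builds, for every candidate length k in range(1,n), the slice w[i:i+k] and calls w.index on it (a full substring search per length); B instead scans each earlier start j < i once, extending the longest common prefix of w[j:] and w[i:] character by character, and keeps the running maximum, so no substring search and no per-length slicing remain.
import Mathlib
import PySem

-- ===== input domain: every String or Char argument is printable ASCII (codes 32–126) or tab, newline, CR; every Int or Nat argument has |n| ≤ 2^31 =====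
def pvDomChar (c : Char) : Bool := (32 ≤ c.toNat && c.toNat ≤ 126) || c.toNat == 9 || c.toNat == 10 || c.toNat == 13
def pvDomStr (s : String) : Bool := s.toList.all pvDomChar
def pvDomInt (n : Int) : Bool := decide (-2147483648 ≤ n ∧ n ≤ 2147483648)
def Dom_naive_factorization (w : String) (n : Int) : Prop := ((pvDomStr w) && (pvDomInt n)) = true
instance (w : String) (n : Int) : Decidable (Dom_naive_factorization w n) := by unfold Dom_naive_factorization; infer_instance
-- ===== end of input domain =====

-- B re-implements the Lempel-Ziv factorization step by a direct longest-common-prefix scan over earlier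
-- start positions instead of A's per-length substring searches (w.index); equivalence of return values is
-- proved on Pre_ (the inputs where A does not raise IndexError).

-- shared trivial helper: Python's one-character string indexing w[i];
-- the IndexError case (i out of range) is excluded by Pre_, "" is only a totalizing default there
def pyChar (cs : List Char) (i : Int) : String :=
  match PySem.List.pyGet? cs i with
  | some c => String.ofList [c]
  | none => ""

-- ===== PORT A =====
-- the while loop of A; matched/longest exactly as in the comprehension
-- (w.index is ported as PySem.Chars.find: the argument w[i:i+k] is a substring of w, so it is always found)
def nfA (cs : List Char) (n : Int) (i : Int) : List (Int × Int × String) :=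
  if _h : i ≤ n then
    let matched := ((PySem.List.pyRange 1 n).filter
        (fun k => decide (PySem.Chars.find cs (PySem.List.slice cs (some i) (some (i + k))) < i))).map
        (fun k => PySem.List.slice cs (some i) (some (i + k)))
    let longest := matched.getLast?.getD []
    (i, (longest.length : Int), pyChar cs i) :: nfA cs n (i + max 1 (longest.length : Int))
  else []
termination_by (n + 1 - i).toNat
decreasing_by
  have h1 : (1:Int) ≤ max 1 ((matched.getLast?.getD []).length : Int) := le_max_left _ _
  omega

def naive_factorization (w : String) (n : Int) : List (Int × Int × String) :=
  nfA w.toList n 1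

-- ===== PORT B =====
-- the inner while loop of Source B: extend t while the characters at j+t and i+t exist and match
def lcpB (cs : List Char) (j i : Nat) (t : Nat) : Nat :=
  if h : i + t < cs.length ∧ cs[j + t]? = cs[i + t]? then lcpB cs j i (t + 1) else t
termination_by cs.length - (i + t)
decreasing_by omega

-- the for-j loop of Source B: best match length over all earlier starts j < i
def bestB (cs : List Char) (i : Nat) : Nat :=
  (List.range i).foldl (fun best j => let t := lcpB cs j i 0; if best < t then t else best) 0

-- the while loop of Source B
def nfB (cs : List Char) (n : Int) (i : Nat) : List (Int × Int × String) :=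
  if _h : (i : Int) ≤ n then
    let length : Int := min ((bestB cs i : Int)) (n - 1)
    ((i : Int), length, pyChar cs (i : Int)) :: nfB cs n (i + (max 1 length).toNat)
  else []
termination_by (n + 1 - (i : Int)).toNat
decreasing_by
  have h1 : (1:Int) ≤ max 1 (min ((bestB cs i : Int)) (n - 1)) := le_max_left _ _
  omega

def naive_factorization_alt (w : String) (n : Int) : List (Int × Int × String) :=
  nfB w.toList n 1

-- ===== PRECONDITION & SPEC =====
-- Pre_ excludes exactly the inputs on which A raises IndexError at w[i]
-- (the loop runs and reaches a position i ≥ len(w), which happens iff n ≥ 1 and n ≥ len(w)).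
def Pre_naive_factorization (w : String) (n : Int) : Prop :=
  n ≤ 0 ∨ n < (w.toList.length : Int)
instance (w : String) (n : Int) : Decidable (Pre_naive_factorization w n) := by
  unfold Pre_naive_factorization; infer_instance

def pvWitness_naive_factorization : String × Int := ("#abaababa", 8)

def Spec_naive_factorization (w : String) (n : Int) (out : List (Int × Int × String)) : Prop :=
  out = naive_factorization_alt w n
instance (w : String) (n : Int) (out : List (Int × Int × String)) : Decidable (Spec_naive_factorization w n out) := by
  unfold Spec_naive_factorization; infer_instance

-- ===== CLAIM (what is proved, stated in full; the proofs are below) =====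
def Claim_equal_naive_factorization : Prop := ∀ (w : String) (n : Int), Dom_naive_factorization w n → Pre_naive_factorization w n → Spec_naive_factorization w n (naive_factorization w n)

-- ===== LEMMAS AND PROOFS =====

-- characters matched so far by lcpB are equal (and in range on the i side)
lemma lcpB_le (cs : List Char) (j i t : Nat) : t ≤ lcpB cs j i t := by
  fun_induction lcpB cs j i t with
  | case1 t h ih => omega
  | case2 t h => omega

lemma lcpB_chars (cs : List Char) (j i : Nat) :
    ∀ t q, t ≤ q → q < lcpB cs j i t → i + q < cs.length ∧ cs[j + q]? = cs[i + q]? := by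
  intro t
  fun_induction lcpB cs j i t with
  | case1 t h ih =>
    intro q hq hlt
    rcases Nat.eq_or_lt_of_le hq with rfl | h2
    · exact h
    · exact ih q h2 hlt
  | case2 t h =>
    intro q hq hlt
    omega

lemma lcpB_ge (cs : List Char) (j i : Nat) :
    ∀ t t2, (∀ q, t ≤ q → q < t2 → i + q < cs.length ∧ cs[j + q]? = cs[i + q]?) →
      t2 ≤ lcpB cs j i t ∨ t2 ≤ t := by
  intro t
  fun_induction lcpB cs j i t with
  | case1 t h ih =>
    intro t2 hyp
    rcases ih t2 (fun q hq hlt => hyp q (by omega) hlt) with h2 | h2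
    · exact Or.inl h2
    · rcases Nat.lt_or_ge t t2 with h3 | h3
      · exact Or.inl (le_trans h2 (lcpB_le cs j i (t + 1)))
      · exact Or.inr h3
  | case2 t h =>
    intro t2 hyp
    rcases Nat.lt_or_ge t t2 with h3 | h3
    · exact absurd (hyp t le_rfl h3) h
    · exact Or.inr h3

lemma lcpB_le_sub (cs : List Char) (j i : Nat) (hi : i ≤ cs.length) :
    lcpB cs j i 0 ≤ cs.length - i := by
  by_contra hc
  have := (lcpB_chars cs j i 0 (cs.length - i) (by omega) (by omega)).1
  omega

-- prefix of an earlier suffix ↔ characterwise equality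
lemma take_prefix_iff (cs : List Char) (j i k : Nat) (hj : j ≤ i) (hk : i + k ≤ cs.length) :
    ((cs.drop i).take k <+: cs.drop j) ↔ ∀ q, q < k → cs[j + q]? = cs[i + q]? := by
  have hlen : ((cs.drop i).take k).length = k := by
    simp [List.length_take, List.length_drop]; omega
  rw [List.prefix_iff_eq_take, hlen]
  constructor
  · intro heq q hq
    have h1 : ((cs.drop i).take k)[q]? = ((cs.drop j).take k)[q]? := by rw [← heq]
    simpa [List.getElem?_take, List.getElem?_drop, hq] using h1.symm
  · intro hch
    apply List.ext_getElem?
    intro q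
    by_cases hq : q < k
    · simp [List.getElem?_take, List.getElem?_drop, hq]
      exact (hch q hq).symm
    · simp [List.getElem?_take, hq]

lemma lcp_iff (cs : List Char) (j i k : Nat) (hj : j < i) (hi : i ≤ cs.length)
    (hk : k ≤ cs.length - i) :
    ((cs.drop i).take k <+: cs.drop j) ↔ k ≤ lcpB cs j i 0 := by
  rw [take_prefix_iff cs j i k (by omega) (by omega)]
  constructor
  · intro hch
    rcases lcpB_ge cs j i 0 k (fun q _ hq => ⟨by omega, hch q hq⟩) with h | h
    · exact h
    · omega
  · intro hle q hq
    exact (lcpB_chars cs j i 0 q (by omega) (by omega)).2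

-- the fold in bestB is a running maximum
lemma foldl_best (g : Nat → Nat) :
    ∀ (l : List Nat) (b : Nat),
      b ≤ l.foldl (fun best j => let t := g j; if best < t then t else best) b ∧
      (∀ j ∈ l, g j ≤ l.foldl (fun best j => let t := g j; if best < t then t else best) b) ∧
      (l.foldl (fun best j => let t := g j; if best < t then t else best) b = b ∨
        ∃ j ∈ l, l.foldl (fun best j => let t := g j; if best < t then t else best) b = g j) := by
  intro l
  induction l with
  | nil => intro b; simp
  | cons x xs ih =>
    intro b
    simp only [List.foldl_cons]
    obtain ⟨h1, h2, h3⟩ := ih (if b < g x then g x else b)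
    refine ⟨?_, ?_, ?_⟩
    · refine le_trans ?_ h1
      split <;> omega
    · intro j hj
      rcases List.mem_cons.1 hj with rfl | hj2
      · refine le_trans ?_ h1
        split <;> omega
      · exact h2 j hj2
    · rcases h3 with h3 | ⟨j, hj, h3⟩
      · by_cases hx : b < g x
        · right; refine ⟨x, List.mem_cons_self .., ?_⟩; simpa [hx] using h3
        · left; simpa [hx] using h3
      · right; exact ⟨j, List.mem_cons_of_mem _ hj, h3⟩

lemma foldl_best' (cs : List Char) (i : Nat) :
    bestB cs i = (List.range i).foldl
      (fun best j => let t := lcpB cs j i 0; if best < t then t else best) 0 := rfl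

lemma bestB_ge (cs : List Char) (i j : Nat) (hj : j < i) : lcpB cs j i 0 ≤ bestB cs i := by
  rw [foldl_best']
  exact (foldl_best (fun j => lcpB cs j i 0) (List.range i) 0).2.1 j (List.mem_range.2 hj)

lemma bestB_cases (cs : List Char) (i : Nat) :
    bestB cs i = 0 ∨ ∃ j, j < i ∧ bestB cs i = lcpB cs j i 0 := by
  rw [foldl_best']
  rcases (foldl_best (fun j => lcpB cs j i 0) (List.range i) 0).2.2 with h | ⟨j, hj, h⟩
  · exact Or.inl h
  · exact Or.inr ⟨j, List.mem_range.1 hj, h⟩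

lemma bestB_le_sub (cs : List Char) (i : Nat) (hi : i ≤ cs.length) :
    bestB cs i ≤ cs.length - i := by
  rcases bestB_cases cs i with h | ⟨j, hj, h⟩
  · omega
  · rw [h]; exact lcpB_le_sub cs j i hi

lemma exists_lcp_iff (cs : List Char) (i k : Nat) (h1 : 1 ≤ i) :
    (∃ j, j < i ∧ k ≤ lcpB cs j i 0) ↔ k ≤ bestB cs i := by
  constructor
  · rintro ⟨j, hj, hk⟩
    exact le_trans hk (bestB_ge cs i j hj)
  · intro hk
    rcases bestB_cases cs i with h | ⟨j, hj, h⟩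
    · exact ⟨0, by omega, by omega⟩
    · exact ⟨j, hj, by omega⟩

-- Python's s.index(t) < i, for t a substring of s: an occurrence of t starts before i
lemma find_lt_iff (cs t : List Char) (i : Nat) (hinf : t <:+: cs) :
    (PySem.Chars.find cs t < (i : Int)) ↔ ∃ j, j < i ∧ t <+: cs.drop j := by
  have h0 : 0 ≤ PySem.Chars.find cs t := (PySem.Chars.find_nonneg_iff cs t).2 hinf
  obtain ⟨hpre, hmin⟩ := PySem.Chars.find_spec h0
  constructor
  · intro h
    exact ⟨(PySem.Chars.find cs t).toNat, by omega, hpre⟩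
  · rintro ⟨j, hj, hp⟩
    by_contra hc
    exact hmin j (by omega) hp

lemma pyRange_nil {a b : Int} (h : b ≤ a) : PySem.List.pyRange a b = [] := by
  rcases List.eq_nil_or_concat (PySem.List.pyRange a b) with hn | ⟨l, x, hx⟩
  · exact hn
  · have : x ∈ PySem.List.pyRange a b := by rw [hx]; simp
    have := PySem.List.mem_pyRange_one.1 this
    omega

lemma filter_le_pyRange (c : Int) :
    ∀ (b a : Int), (PySem.List.pyRange a b).filter (fun k => decide (k ≤ c)) =
      PySem.List.pyRange a (min (c + 1) b) := by
  intro b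
  suffices h : ∀ (F : Nat) (a : Int), (b - a).toNat ≤ F →
      (PySem.List.pyRange a b).filter (fun k => decide (k ≤ c)) =
        PySem.List.pyRange a (min (c + 1) b) by
    intro a; exact h (b - a).toNat a le_rfl
  intro F
  induction F with
  | zero =>
    intro a hF
    rw [pyRange_nil (by omega), pyRange_nil (by omega : min (c + 1) b ≤ a)]
    rfl
  | succ F ih =>
    intro a hF
    by_cases hab : a < b
    · rw [PySem.List.pyRange_one_cons hab, List.filter_cons]
      by_cases hac : a ≤ c
      · have : (decide (a ≤ c)) = true := by simpa using hac
        rw [this, if_pos rfl]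
        rw [ih (a + 1) (by omega)]
        rw [PySem.List.pyRange_one_cons (by omega : a < min (c + 1) b)]
      · have : (decide (a ≤ c)) = false := by simpa using hac
        rw [this, if_neg (by simp)]
        rw [List.filter_eq_nil_iff.2, pyRange_nil (by omega : min (c + 1) b ≤ a)]
        intro k hk
        have := PySem.List.mem_pyRange_one.1 hk
        simp
        omega
    · rw [pyRange_nil (by omega), pyRange_nil (by omega : min (c + 1) b ≤ a)]
      rfl

-- the step of A computes the same match length as the step of B
lemma step_eq (cs : List Char) (n : Int) (i : Nat) (h1 : 1 ≤ i) (hi : i < cs.length) (hn : 1 ≤ n) :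
    ((((PySem.List.pyRange 1 n).filter
        (fun k => decide (PySem.Chars.find cs (PySem.List.slice cs (some (i:Int)) (some ((i:Int) + k))) < (i:Int)))).map
        (fun k => PySem.List.slice cs (some (i:Int)) (some ((i:Int) + k)))).getLast?.getD []).length
      = (min ((bestB cs i : Int)) (n - 1)).toNat := by
  have hBle : bestB cs i ≤ cs.length - i := bestB_le_sub cs i (by omega)
  obtain ⟨KI, hKIfacts⟩ : ∃ KI : Int,
      ((bestB cs i : Int) = (cs.length : Int) - (i : Int) ∧ KI = n - 1) ∨
      ((bestB cs i : Int) < (cs.length : Int) - (i : Int) ∧ KI = min (bestB cs i : Int) (n - 1)) := by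
    by_cases h : (bestB cs i : Int) = (cs.length : Int) - (i : Int)
    · exact ⟨n - 1, Or.inl ⟨h, rfl⟩⟩
    · exact ⟨min (bestB cs i : Int) (n - 1), Or.inr ⟨by omega, rfl⟩⟩
  have hKIle : KI ≤ n - 1 := by rcases hKIfacts with ⟨_, h⟩ | ⟨_, h⟩ <;> omega
  have hiff : ∀ k : Int, k ∈ PySem.List.pyRange 1 n →
      (decide (PySem.Chars.find cs (PySem.List.slice cs (some (i : Int)) (some ((i : Int) + k))) < (i : Int)))
        = (decide (k ≤ KI)) := by
    intro k hk
    obtain ⟨hk1, hk2⟩ := PySem.List.mem_pyRange_one.1 hk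
    rw [decide_eq_decide]
    have hs : PySem.List.slice cs (some (i : Int)) (some ((i : Int) + k)) =
        (cs.drop i).take k.toNat := by
      rw [PySem.List.slice_toNat cs (by omega) (by omega)]
      have h1 : ((i : Int) + k).toNat - ((i : Int)).toNat = k.toNat := by omega
      have h2 : ((i : Int)).toNat = i := by omega
      rw [h1, h2]
    obtain ⟨k', hk'⟩ : ∃ k', k' = min k.toNat (cs.length - i) := ⟨_, rfl⟩
    have htk : (cs.drop i).take k.toNat = (cs.drop i).take k' := by
      by_cases h : k.toNat ≤ cs.length - i
      · have he : k' = k.toNat := by omega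
        rw [he]
      · have h2 : (cs.drop i).length ≤ k.toNat := by
          rw [List.length_drop]; omega
        rw [List.take_of_length_le h2]
        have he : k' = (cs.drop i).length := by rw [List.length_drop]; omega
        rw [he, List.take_length]
    have hinf : (cs.drop i).take k' <:+: cs :=
      ((List.take_prefix _ _).isInfix).trans (List.drop_suffix _ _).isInfix
    rw [hs, htk, find_lt_iff cs _ i hinf]
    have h4 : (∃ j, j < i ∧ (cs.drop i).take k' <+: cs.drop j) ↔ k' ≤ bestB cs i := by
      rw [← exists_lcp_iff cs i k' (by omega)]
      exact exists_congr fun j => and_congr_right fun hj =>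
        lcp_iff cs j i k' hj (by omega) (by omega)
    rw [h4]
    clear hs htk hinf h4 hk
    rcases hKIfacts with ⟨hc, hd⟩ | ⟨hc, hd⟩ <;> rw [hd] <;> omega
  rw [List.filter_congr hiff, filter_le_pyRange KI n 1]
  have hmin : min (KI + 1) n = KI + 1 := by omega
  rw [hmin]
  by_cases hKIpos : 1 ≤ KI
  · rw [PySem.List.pyRange_one_succ_right hKIpos, List.map_append]
    simp only [List.map_cons, List.map_nil, List.getLast?_concat, Option.getD_some]
    have hs : PySem.List.slice cs (some (i : Int)) (some ((i : Int) + KI)) =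
        (cs.drop i).take KI.toNat := by
      rw [PySem.List.slice_toNat cs (by omega) (by omega)]
      have h1 : ((i : Int) + KI).toNat - ((i : Int)).toNat = KI.toNat := by omega
      have h2 : ((i : Int)).toNat = i := by omega
      rw [h1, h2]
    rw [hs, List.length_take, List.length_drop]
    rcases hKIfacts with ⟨hc, hd⟩ | ⟨hc, hd⟩ <;> rw [hd] at hKIpos ⊢ <;> omega
  · rw [pyRange_nil (by omega : KI + 1 ≤ 1)]
    simp only [List.map_nil, List.getLast?_nil, Option.getD_none, List.length_nil]
    rcases hKIfacts with ⟨hc, hd⟩ | ⟨hc, hd⟩ <;> rw [hd] at hKIpos <;> omega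

lemma nf_eq (cs : List Char) (n : Int) (hP : n ≤ 0 ∨ n < (cs.length : Int)) :
    ∀ (F i : Nat), (n + 1 - (i : Int)).toNat ≤ F → 1 ≤ i → nfA cs n (i : Int) = nfB cs n i := by
  intro F
  induction F with
  | zero =>
    intro i hF h1
    rw [nfA, nfB, dif_neg (by omega : ¬ ((i : Int) ≤ n)), dif_neg (by omega : ¬ ((i : Int) ≤ n))]
  | succ F ih =>
    intro i hF h1
    by_cases hc : (i : Int) ≤ n
    · have hn : 1 ≤ n := by omega
      have hilen : i < cs.length := by
        rcases hP with h | h <;> omega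
      rw [nfA, nfB, dif_pos hc, dif_pos hc]
      simp only [step_eq cs n i h1 hilen hn]
      have hm : (((min ((bestB cs i : Int)) (n - 1)).toNat : Nat) : Int)
          = min ((bestB cs i : Int)) (n - 1) := by omega
      rw [hm]
      have harg : (i : Int) + max 1 (min ((bestB cs i : Int)) (n - 1))
          = ((i + (max 1 (min ((bestB cs i : Int)) (n - 1))).toNat : Nat) : Int) := by omega
      rw [harg]
      refine congrArg (List.cons _) (ih _ ?_ (by omega))
      omega
    · rw [nfA, nfB, dif_neg hc, dif_neg hc]

-- ===== VERDICT (by name: the statement is the Claim_ definition above) =====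
theorem naive_factorization_spec : Claim_equal_naive_factorization := by
  intro w n _hD hP
  unfold Spec_naive_factorization naive_factorization naive_factorization_alt
  exact nf_eq w.toList n hP ((n + 1 - 1).toNat) 1 (by omega) le_rfl
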